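-- pv_equiv track=rewrite | github.com/Souhaila84/GPS | algoTournee.py | clarke_wright_savings
-- ===== SOURCE A (Python) =====
-- def clarke_wright_savings(distances, demands, vehicle_capacity):
--     n = len(distances)
--     routes = [[i] for i in range(1, n)]
--     savings = []
--
--     for i in range(1, n):
--         for j in range(i+1, n):
--             saving = distances[0][i] + distances[0][j] - distances[i][j]
--             savings.append((saving, i, j))
--
--     savings.sort(reverse=True, key=lambda x: x[0])
--
--     for saving, i, j in savings:
--         route_i = next((r for r in routes if i in r), None)
--         route_j = next((r for r in routes if j in r), None)
--
--         if route_i != route_j and sum(demands[k] for k in route_i + route_j) <= vehicle_capacity: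
--             routes.remove(route_i)
--             routes.remove(route_j)
--             routes.append(route_i + route_j)
--
--     return routes
-- ===== SOURCE B (Python) =====
-- def clarke_wright_savings(distances, demands, vehicle_capacity):
--     # Same Clarke-Wright merge policy, but O(1) route lookup via an owner map and
--     # cached per-route demand sums instead of A's linear route/demand scans.
--     n = len(distances)
--     savings = [(distances[0][i] + distances[0][j] - distances[i][j], i, j)
--                for i in range(1, n) for j in range(i + 1, n)]
--     savings.sort(reverse=True, key=lambda x: x[0])
--
--     nodes = {}   # route id -> list of customer nodes (insertion order = A's routes order)
--     load = {}    # route id -> cached total demand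
--     owner = {}   # customer node -> id of the route containing it
--     for i in range(1, n):
--         nodes[i] = [i]
--         load[i] = demands[i]
--         owner[i] = i
--     next_id = n
--
--     for saving, i, j in savings:
--         a, b = owner[i], owner[j]
--         if a != b and load[a] + load[b] <= vehicle_capacity:
--             merged = nodes[a] + nodes[b]
--             for k in merged:
--                 owner[k] = next_id
--             del nodes[a]
--             del nodes[b]
--             nodes[next_id] = merged
--             load[next_id] = load[a] + load[b]
--             next_id += 1
--
--     return list(nodes.values())
-- ===== Notes on version B (the rewrite author's own statement) =====
-- stated objective: faster
-- what changed: B replaces A's per-saving linear scans (finding each node's route by scanning all routes and re-summing route demands on every candidate merge) with a node-to-route-id map and cached per-route demand sums, updated incrementally at each merge.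
-- outside the precondition, e.g. on clarke_wright_savings([[0, 1], [1, 0]], [], 0): A returns [[1]], B raises IndexError
import Mathlib
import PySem

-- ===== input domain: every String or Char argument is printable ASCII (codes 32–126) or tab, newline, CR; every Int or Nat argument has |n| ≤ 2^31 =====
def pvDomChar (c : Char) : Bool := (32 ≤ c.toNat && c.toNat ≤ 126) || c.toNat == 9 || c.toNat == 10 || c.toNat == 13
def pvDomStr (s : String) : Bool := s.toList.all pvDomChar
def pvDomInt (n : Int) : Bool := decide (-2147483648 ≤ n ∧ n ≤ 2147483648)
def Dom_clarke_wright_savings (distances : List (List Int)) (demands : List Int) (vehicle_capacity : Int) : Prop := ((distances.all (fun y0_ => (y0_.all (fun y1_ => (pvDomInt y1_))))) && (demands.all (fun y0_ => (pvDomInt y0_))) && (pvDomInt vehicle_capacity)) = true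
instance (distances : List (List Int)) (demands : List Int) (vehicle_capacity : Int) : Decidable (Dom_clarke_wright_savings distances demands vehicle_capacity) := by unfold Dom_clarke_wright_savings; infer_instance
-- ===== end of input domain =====

-- B replaces A's linear scans over `routes` (route lookup by membership, re-summed
-- demands) by an owner map and cached per-route demand sums; same merge policy and
-- same output order.

-- ===== PORT A =====
-- savings list: nested for-loops appending (saving, i, j); indexing demands/distances
-- is via pyGetD — exact on Pre_, where every index Python touches is in range.
def cwA_savings (distances : List (List Int)) : List (Int × Int × Int) :=
  let n : Int := distances.length
  (PySem.List.pyRange 1 n 1).foldl (fun acc i =>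
    (PySem.List.pyRange (i + 1) n 1).foldl (fun acc j =>
      acc ++ [(PySem.List.pyGetD (PySem.List.pyGetD distances 0 []) i 0
                + PySem.List.pyGetD (PySem.List.pyGetD distances 0 []) j 0
                - PySem.List.pyGetD (PySem.List.pyGetD distances i []) j 0, i, j)]) acc) []

-- one iteration of A's merge loop; the `_, _` fallbacks are unreachable (every node
-- 1..n-1 always lies in exactly one route, and the found routes are members), they
-- only make the match total.
def cwA_step (demands : List Int) (cap : Int) (routes : List (List Int)) (t : Int × Int × Int) : List (List Int) :=
  match routes.find? (fun r => r.contains t.2.1), routes.find? (fun r => r.contains t.2.2) with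
  | some ri, some rj =>
      if ri ≠ rj ∧ ((ri ++ rj).map (fun k => PySem.List.pyGetD demands k 0)).sum ≤ cap then
        let r1 := (PySem.List.remove? routes ri).getD routes
        let r2 := (PySem.List.remove? r1 rj).getD r1
        r2 ++ [ri ++ rj]
      else routes
  | _, _ => routes

def clarke_wright_savings (distances : List (List Int)) (demands : List Int) (vehicle_capacity : Int) : List (List Int) :=
  let n : Int := distances.length
  let routes := (PySem.List.pyRange 1 n 1).map (fun i => [i])
  let savings := PySem.List.sorted (cwA_savings distances) (fun x => x.1) true
  savings.foldl (cwA_step demands vehicle_capacity) routes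

-- ===== PORT B =====
-- state of Source B's loop: nodes (route id -> node list), load (route id -> cached
-- demand sum), owner (node -> route id), next_id
structure CWState where
  nodes : PySem.Dict Int (List Int)
  load  : PySem.Dict Int Int
  owner : PySem.Dict Int Int
  nid   : Int

def cwB_savings (distances : List (List Int)) : List (Int × Int × Int) :=
  let n : Int := distances.length
  (PySem.List.pyRange 1 n 1).flatMap (fun i =>
    (PySem.List.pyRange (i + 1) n 1).map (fun j =>
      (PySem.List.pyGetD (PySem.List.pyGetD distances 0 []) i 0
        + PySem.List.pyGetD (PySem.List.pyGetD distances 0 []) j 0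
        - PySem.List.pyGetD (PySem.List.pyGetD distances i []) j 0, i, j)))

def cwB_initStep (demands : List Int) (st : CWState) (i : Int) : CWState :=
  { nodes := st.nodes.insert i [i],
    load  := st.load.insert i (PySem.List.pyGetD demands i 0),
    owner := st.owner.insert i i,
    nid   := st.nid }

def cwB_init (demands : List Int) (n : Int) : CWState :=
  (PySem.List.pyRange 1 n 1).foldl (cwB_initStep demands) ⟨PySem.Dict.empty, PySem.Dict.empty, PySem.Dict.empty, n⟩

-- one iteration of Source B's merge loop; owner[i]/owner[j] are total lookups in Source B
-- (every node is a key), the `_, _` fallback only makes the match total; nodes[a],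
-- load[a] are ported with getD (the keys are always present).
def cwB_step (cap : Int) (st : CWState) (t : Int × Int × Int) : CWState :=
  match st.owner.get? t.2.1, st.owner.get? t.2.2 with
  | some a, some b =>
      if a ≠ b ∧ st.load.getD a 0 + st.load.getD b 0 ≤ cap then
        let merged := st.nodes.getD a [] ++ st.nodes.getD b []
        { nodes := ((st.nodes.erase a).erase b).insert st.nid merged,
          load  := st.load.insert st.nid (st.load.getD a 0 + st.load.getD b 0),
          owner := merged.foldl (fun d k => d.insert k st.nid) st.owner,
          nid   := st.nid + 1 }
      else st
  | _, _ => st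

def clarke_wright_savings_alt (distances : List (List Int)) (demands : List Int) (vehicle_capacity : Int) : List (List Int) :=
  let n : Int := distances.length
  let savings := PySem.List.sorted (cwB_savings distances) (fun x => x.1) true
  (savings.foldl (cwB_step vehicle_capacity) (cwB_init demands n)).nodes.values

-- ===== PRECONDITION & SPEC =====
-- Pre_ excludes exactly the inputs on which A raises IndexError (some distance row
-- among the first n-1 shorter than n, or the demands list shorter than n, for n ≥ 3),
-- plus the n = 2 inputs with demands shorter than 2: there A never reads demands and
-- returns [[1]], while B's eager per-route demand cache reads demands[1] and raises.
def Pre_clarke_wright_savings (distances : List (List Int)) (demands : List Int) (vehicle_capacity : Int) : Prop :=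
  (2 ≤ distances.length → distances.length ≤ demands.length) ∧
  (3 ≤ distances.length → ∀ row ∈ distances.dropLast, distances.length ≤ row.length)
instance (distances : List (List Int)) (demands : List Int) (vehicle_capacity : Int) : Decidable (Pre_clarke_wright_savings distances demands vehicle_capacity) := by unfold Pre_clarke_wright_savings; infer_instance

def pvWitness_clarke_wright_savings : List (List Int) × List Int × Int :=
  ([[0, 2, 3], [2, 0, 1], [3, 1, 0]], [0, 4, 3], 10)

def Spec_clarke_wright_savings (distances : List (List Int)) (demands : List Int) (vehicle_capacity : Int) (out : List (List Int)) : Prop := out = clarke_wright_savings_alt distances demands vehicle_capacity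
instance (distances : List (List Int)) (demands : List Int) (vehicle_capacity : Int) (out : List (List Int)) : Decidable (Spec_clarke_wright_savings distances demands vehicle_capacity out) := by unfold Spec_clarke_wright_savings; infer_instance

-- ===== CLAIM (what is proved, stated in full; the proofs are below) =====
def Claim_equal_clarke_wright_savings : Prop := ∀ (distances : List (List Int)) (demands : List Int) (vehicle_capacity : Int), Dom_clarke_wright_savings distances demands vehicle_capacity → Pre_clarke_wright_savings distances demands vehicle_capacity → Spec_clarke_wright_savings distances demands vehicle_capacity (clarke_wright_savings distances demands vehicle_capacity)

-- ===== LEMMAS AND PROOFS =====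

-- total demand of a route, as A sums it
def cwDS (demands : List Int) (r : List Int) : Int :=
  (r.map (fun k => PySem.List.pyGetD demands k 0)).sum

lemma cwDS_append (demands : List Int) (r1 r2 : List Int) :
    cwDS demands (r1 ++ r2) = cwDS demands r1 + cwDS demands r2 := by
  simp [cwDS]

-- the two savings lists are the same list
lemma cw_savings_eq (distances : List (List Int)) : cwA_savings distances = cwB_savings distances := by
  simp only [cwA_savings, cwB_savings, PySem.List.foldl_append_singleton_eq_map,
    PySem.List.foldl_append_eq_flatMap, List.nil_append]

-- the invariant tying A's routes list to B's state
structure CWInv (demands : List Int) (n : Int) (routes : List (List Int)) (st : CWState) : Prop where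
  hv : st.nodes.values = routes
  hk : st.nodes.keys.Pairwise (· < ·)
  hfresh : ∀ k ∈ st.nodes.keys, k < st.nid
  hgood : ∀ p ∈ st.nodes.items, p.2 ≠ [] ∧ ∀ x ∈ p.2, 1 ≤ x ∧ x < n
  hdisj : ∀ p ∈ st.nodes.items, ∀ q ∈ st.nodes.items, p.1 ≠ q.1 → ∀ x, x ∈ p.2 → x ∉ q.2
  hown : ∀ x : Int, 1 ≤ x → x < n → ∃ t r, st.owner.get? x = some t ∧ st.nodes.get? t = some r ∧ x ∈ r
  hload : ∀ t r, st.nodes.get? t = some r → st.load.getD t 0 = cwDS demands r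

lemma cw_find_first (d : PySem.Dict Int (List Int)) (x a : Int) (ri : List Int)
    (hget : d.get? a = some ri) (hx : x ∈ ri)
    (hd : ∀ p ∈ d.items, ∀ q ∈ d.items, p.1 ≠ q.1 → ∀ y, y ∈ p.2 → y ∉ q.2) :
    d.values.find? (fun r => r.contains x) = some ri := by
  obtain ⟨l⟩ := d
  simp only [PySem.Dict.get?, PySem.Dict.values] at *
  induction l with
  | nil => simp at hget
  | cons p ps ih =>
      by_cases hc : x ∈ p.2
      · have hfind : (List.map (fun x => x.2) (p :: ps)).find? (fun r => r.contains x) = some p.2 := by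
          simp [hc]
        rw [hfind]
        by_cases hpa : p.1 = a
        · simp only [List.find?_cons, hpa, BEq.rfl] at hget
          simp only [Option.map_some] at hget
          rw [hget]
        · -- the entry holding ri is some q ∈ ps with q.1 = a; disjointness contradicts x ∈ p.2 ∧ x ∈ ri
          exfalso
          have hq : ∃ q ∈ p :: ps, q.1 = a ∧ q.2 = ri := by
            rcases hfq : List.find? (fun p => p.1 == a) (p :: ps) with _ | q
            · rw [hfq] at hget; simp at hget
            · rw [hfq] at hget
              simp only [Option.map_some, Option.some.injEq] at hget
              have := List.find?_some hfq
              exact ⟨q, List.mem_of_find?_eq_some hfq, by simpa using this, hget⟩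
          obtain ⟨q, hqmem, hqa, hqri⟩ := hq
          have hpq : p.1 ≠ q.1 := by rw [hqa]; exact hpa
          have := hd p (List.mem_cons_self) q hqmem hpq x hc
          rw [hqri] at this
          exact this hx
      · have hpa : p.1 ≠ a := by
          intro hpa
          simp only [List.find?_cons, hpa, BEq.rfl] at hget
          simp only [Option.map_some, Option.some.injEq] at hget
          exact hc (hget ▸ hx)
        have hget' : Option.map (fun x => x.2) (List.find? (fun p => p.1 == a) ps) = some ri := by
          simpa [List.find?_cons, hpa] using hget
        have hd' : ∀ p' ∈ ps, ∀ q ∈ ps, p'.1 ≠ q.1 → ∀ y, y ∈ p'.2 → y ∉ q.2 := by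
          intro p' hp' q hq hne y hy
          exact hd p' (List.mem_cons_of_mem _ hp') q (List.mem_cons_of_mem _ hq) hne y hy
        have := ih hget' hd'
        simpa [List.find?_cons, hc] using this

lemma cw_get?_erase_of_ne {ν : Type} (d : PySem.Dict Int ν) (a t : Int) (h : t ≠ a) :
    (d.erase a).get? t = d.get? t := by
  obtain ⟨l⟩ := d
  simp only [PySem.Dict.erase, PySem.Dict.get?]
  induction l with
  | nil => rfl
  | cons p ps ih =>
      by_cases hpa : p.1 = a
      · have h1 : (!(p.1 == a)) = false := by simp [hpa]
        have h2 : (p.1 == t) = false := by simp [hpa, Ne.symm h]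
        simp only [List.filter_cons, h1, Bool.false_eq_true, if_false, List.find?_cons, h2]
        exact ih
      · have h1 : (!(p.1 == a)) = true := by simp [hpa]
        by_cases hpt : p.1 = t
        · have h2 : (p.1 == t) = true := by simp [hpt]
          simp only [List.filter_cons, h1, if_true, List.find?_cons, h2]
        · have h2 : (p.1 == t) = false := by simp [hpt]
          simp only [List.filter_cons, h1, if_true, List.find?_cons, h2]
          exact ih

lemma cw_get?_erase_self {ν : Type} (d : PySem.Dict Int ν) (a : Int) :
    (d.erase a).get? a = none := by
  obtain ⟨l⟩ := d
  simp only [PySem.Dict.erase, PySem.Dict.get?]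
  rw [List.find?_eq_none.mpr]
  · rfl
  · intro p hp
    simp only [List.mem_filter, Bool.not_eq_eq_eq_not, Bool.not_true] at hp
    simp [hp.2]

lemma cw_mem_items_erase {ν : Type} (d : PySem.Dict Int ν) (a : Int) (q : Int × ν) :
    q ∈ (d.erase a).items ↔ q ∈ d.items ∧ q.1 ≠ a := by
  obtain ⟨l⟩ := d
  simp [PySem.Dict.erase, List.mem_filter]

lemma cw_values_erase (d : PySem.Dict Int (List Int)) (a : Int) (ri : List Int)
    (hget : d.get? a = some ri)
    (huniq : ∀ q ∈ d.items, q.1 ≠ a → q.2 ≠ ri)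
    (hnd : d.keys.Nodup) :
    (d.erase a).values = d.values.erase ri := by
  obtain ⟨l⟩ := d
  simp only [PySem.Dict.erase, PySem.Dict.get?, PySem.Dict.values, PySem.Dict.keys] at *
  induction l with
  | nil => simp at hget
  | cons p ps ih =>
      by_cases hpa : p.1 = a
      · simp only [List.find?_cons, hpa, BEq.rfl, Option.map_some, Option.some.injEq] at hget
        have hnoa : ∀ q ∈ ps, ¬(q.1 == a) := by
          intro q hq
          have : p.1 ∉ List.map (fun x => x.1) ps := by
            simpa using (List.nodup_cons.mp hnd).1
          simp only [beq_iff_eq]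
          intro hqa
          exact this (List.mem_map.mpr ⟨q, hq, by rw [hqa, hpa]⟩)
        have hfilter : List.filter (fun p => !p.1 == a) ps = ps := by
          apply List.filter_eq_self.mpr
          intro q hq
          simpa using hnoa q hq
        simp [hpa, hfilter, hget]
      · have hvne : p.2 ≠ ri := huniq p (List.mem_cons_self) hpa
        have hget' : Option.map (fun x => x.2) (List.find? (fun p => p.1 == a) ps) = some ri := by
          simpa [List.find?_cons, hpa] using hget
        have ih' := ih hget' (fun q hq => huniq q (List.mem_cons_of_mem _ hq))
          ((List.nodup_cons.mp hnd).2)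
        have hbe : (p.2 == ri) = false := by simpa using hvne
        simp [hpa, hbe, ih']

lemma cw_get?_foldl_insert (l : List Int) (d : PySem.Dict Int Int) (v x : Int) :
    (l.foldl (fun d k => d.insert k v) d).get? x = if x ∈ l then some v else d.get? x := by
  induction l generalizing d with
  | nil => simp
  | cons k ks ih =>
      rw [List.foldl_cons, ih]
      by_cases hks : x ∈ ks
      · simp [hks]
      · by_cases hk : x = k
        · simp [hk, PySem.Dict.get?_insert_self]
        · simp [hks, hk, PySem.Dict.get?_insert]

-- one step preserves the invariant
lemma cw_step_inv (demands : List Int) (n cap : Int) (routes : List (List Int)) (st : CWState)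
    (t : Int × Int × Int) (hi : 1 ≤ t.2.1 ∧ t.2.1 < n) (hj : 1 ≤ t.2.2 ∧ t.2.2 < n)
    (inv : CWInv demands n routes st) :
    CWInv demands n (cwA_step demands cap routes t) (cwB_step cap st t) := by
  obtain ⟨a, ri, hoa, hna, hira⟩ := inv.hown t.2.1 hi.1 hi.2
  obtain ⟨b, rj, hob, hnb, hjrb⟩ := inv.hown t.2.2 hj.1 hj.2
  have hfindi : routes.find? (fun r => r.contains t.2.1) = some ri := by
    rw [← inv.hv]; exact cw_find_first st.nodes t.2.1 a ri hna hira inv.hdisj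
  have hfindj : routes.find? (fun r => r.contains t.2.2) = some rj := by
    rw [← inv.hv]; exact cw_find_first st.nodes t.2.2 b rj hnb hjrb inv.hdisj
  have hndk : st.nodes.keys.Nodup := inv.hk.imp ne_of_lt
  simp only [cwA_step, cwB_step, hfindi, hfindj, hoa, hob]
  by_cases hab : a = b
  · subst hab
    have hrr : ri = rj := by rw [hna] at hnb; exact Option.some.inj hnb
    rw [if_neg (by rintro ⟨h1, -⟩; exact h1 hrr), if_neg (by rintro ⟨h1, -⟩; exact h1 rfl)]
    exact inv
  · have hmemA : (a, ri) ∈ st.nodes.items := PySem.Dict.mem_items_of_get?_eq_some _ hna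
    have hmemB : (b, rj) ∈ st.nodes.items := PySem.Dict.mem_items_of_get?_eq_some _ hnb
    have hdisjab : ∀ x, x ∈ ri → x ∉ rj := inv.hdisj _ hmemA _ hmemB hab
    have hrirj : ri ≠ rj := fun h => (hdisjab t.2.1 hira) (h ▸ hira)
    have hla : st.load.getD a 0 = cwDS demands ri := inv.hload a ri hna
    have hlb : st.load.getD b 0 = cwDS demands rj := inv.hload b rj hnb
    have hga : st.nodes.getD a [] = ri := PySem.Dict.getD_of_get?_eq_some _ [] hna
    have hgb : st.nodes.getD b [] = rj := PySem.Dict.getD_of_get?_eq_some _ [] hnb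
    have hsum : ((ri ++ rj).map (fun k => PySem.List.pyGetD demands k 0)).sum
        = st.load.getD a 0 + st.load.getD b 0 := by
      rw [hla, hlb, ← cwDS_append]; rfl
    by_cases hc : st.load.getD a 0 + st.load.getD b 0 ≤ cap
    · rw [if_pos ⟨hrirj, by rw [hsum]; exact hc⟩, if_pos ⟨hab, hc⟩]
      simp only [hga, hgb]
      -- names for the updated dictionaries
      set d1 := st.nodes.erase a with hd1
      set d2 := d1.erase b with hd2
      have hbna : b ≠ a := fun h => hab h.symm
      have huniqa : ∀ q ∈ st.nodes.items, q.1 ≠ a → q.2 ≠ ri := by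
        intro q hq hqa hq2
        exact (inv.hdisj _ hmemA _ hq (fun h => hqa h.symm) t.2.1 hira) (hq2 ▸ hira)
      have hvE1 : d1.values = st.nodes.values.erase ri := cw_values_erase _ a ri hna huniqa hndk
      have hget1 : d1.get? b = some rj := by
        rw [hd1, cw_get?_erase_of_ne _ _ _ hbna]; exact hnb
      have hnd1 : d1.keys.Nodup := by
        have hsub : d1.keys.Sublist st.nodes.keys := by
          simp only [hd1, PySem.Dict.erase, PySem.Dict.keys]
          exact List.filter_sublist.map _
        exact hsub.nodup hndk
      have huniq1 : ∀ q ∈ d1.items, q.1 ≠ b → q.2 ≠ rj := by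
        intro q hq hqb hq2
        have hq' : q ∈ st.nodes.items := ((cw_mem_items_erase _ _ _).mp hq).1
        exact (inv.hdisj _ hmemB _ hq' (fun h => hqb h.symm) t.2.2 hjrb) (hq2 ▸ hjrb)
      have hvE2 : d2.values = d1.values.erase rj := cw_values_erase _ b rj hget1 huniq1 hnd1
      have hsub2 : d2.keys.Sublist st.nodes.keys := by
        simp only [hd2, hd1, PySem.Dict.erase, PySem.Dict.keys]
        exact (List.filter_sublist.trans List.filter_sublist).map _
      have hkey_lt : ∀ k ∈ d2.keys, k < st.nid := fun k hk => inv.hfresh k (hsub2.mem hk)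
      have hnotc : d2.contains st.nid = false := by
        rw [Bool.eq_false_iff]
        intro h
        exact lt_irrefl _ (hkey_lt _ ((PySem.Dict.contains_iff_mem_keys d2 st.nid).mp h))
      have hitems' : (d2.insert st.nid (ri ++ rj)).items = d2.items ++ [(st.nid, ri ++ rj)] :=
        PySem.Dict.items_insert_of_not_contains _ _ hnotc
      have hmem' : ∀ q, q ∈ (d2.insert st.nid (ri ++ rj)).items ↔
          ((q ∈ st.nodes.items ∧ q.1 ≠ a ∧ q.1 ≠ b) ∨ q = (st.nid, ri ++ rj)) := by
        intro q
        rw [hitems', List.mem_append, cw_mem_items_erase, cw_mem_items_erase]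
        simp only [List.mem_singleton]
        tauto
      have hriroutes : ri ∈ routes := by
        rw [← inv.hv]
        exact List.mem_map.mpr ⟨(a, ri), hmemA, rfl⟩
      have hrjroutes : rj ∈ routes.erase ri := by
        rw [List.mem_erase_of_ne (fun h => hrirj h.symm), ← inv.hv]
        exact List.mem_map.mpr ⟨(b, rj), hmemB, rfl⟩
      have hrm1 : (PySem.List.remove? routes ri).getD routes = routes.erase ri := by
        rw [PySem.List.remove?_eq_some_erase routes ri hriroutes]; rfl
      have hrm2 : (PySem.List.remove? (routes.erase ri) rj).getD (routes.erase ri)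
          = (routes.erase ri).erase rj := by
        rw [PySem.List.remove?_eq_some_erase _ rj hrjroutes]; rfl
      constructor
      · -- hv
        simp only [hrm1, hrm2]
        show (d2.insert st.nid (ri ++ rj)).values = _
        simp only [PySem.Dict.values, hitems', List.map_append]
        rw [show List.map (fun x => x.2) d2.items = d2.values from rfl]
        rw [hvE2, hvE1, inv.hv]
        rfl
      · -- hk
        show (d2.insert st.nid (ri ++ rj)).keys.Pairwise (· < ·)
        have : (d2.insert st.nid (ri ++ rj)).keys = d2.keys ++ [st.nid] := by
          simp [PySem.Dict.keys, hitems']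
        rw [this]
        refine List.pairwise_append.mpr ⟨inv.hk.sublist hsub2, List.pairwise_singleton _ _, ?_⟩
        intro x hx y hy
        rw [List.mem_singleton] at hy
        exact hy ▸ hkey_lt x hx
      · -- hfresh
        intro k hk
        show k < st.nid + 1
        have : (d2.insert st.nid (ri ++ rj)).keys = d2.keys ++ [st.nid] := by
          simp [PySem.Dict.keys, hitems']
        rw [this, List.mem_append, List.mem_singleton] at hk
        rcases hk with hk | rfl
        · exact lt_trans (hkey_lt k hk) (lt_add_one _)
        · exact lt_add_one _
      · -- hgood
        intro p hp
        rcases (hmem' p).mp hp with ⟨hp', -, -⟩ | rfl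
        · exact inv.hgood p hp'
        · refine ⟨List.ne_nil_of_mem (List.mem_append_left _ hira), ?_⟩
          intro x hx
          rcases List.mem_append.mp hx with hx | hx
          · exact (inv.hgood _ hmemA).2 x hx
          · exact (inv.hgood _ hmemB).2 x hx
      · -- hdisj
        intro p hp q hq hne x hx
        rcases (hmem' p).mp hp with ⟨hp', hpa, hpb⟩ | rfl <;>
          rcases (hmem' q).mp hq with ⟨hq', hqa, hqb⟩ | rfl
        · exact inv.hdisj p hp' q hq' hne x hx
        · intro hxm
          rcases List.mem_append.mp hxm with hxm | hxm
          · exact inv.hdisj p hp' _ hmemA hpa x hx hxm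
          · exact inv.hdisj p hp' _ hmemB hpb x hx hxm
        · rcases List.mem_append.mp hx with hx' | hx'
          · exact inv.hdisj _ hmemA q hq' (fun h => hqa h.symm) x hx'
          · exact inv.hdisj _ hmemB q hq' (fun h => hqb h.symm) x hx'
        · exact absurd rfl hne
      · -- hown
        intro x hx1 hx2
        by_cases hxm : x ∈ ri ++ rj
        · refine ⟨st.nid, ri ++ rj, ?_, PySem.Dict.get?_insert_self _ _ _, hxm⟩
          rw [cw_get?_foldl_insert, if_pos hxm]
        · obtain ⟨u, r, hou, hnu, hxr⟩ := inv.hown x hx1 hx2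
          have hua : u ≠ a := by
            intro h; subst h
            rw [hna] at hnu
            exact hxm (List.mem_append_left _ ((Option.some.inj hnu) ▸ hxr))
          have hub : u ≠ b := by
            intro h; subst h
            rw [hnb] at hnu
            exact hxm (List.mem_append_right _ ((Option.some.inj hnu) ▸ hxr))
          have hun : u ≠ st.nid := by
            have : u ∈ st.nodes.keys :=
              List.mem_map.mpr ⟨(u, r), PySem.Dict.mem_items_of_get?_eq_some _ hnu, rfl⟩
            exact ne_of_lt (inv.hfresh u this)
          refine ⟨u, r, ?_, ?_, hxr⟩
          · rw [cw_get?_foldl_insert, if_neg hxm]; exact hou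
          · rw [PySem.Dict.get?_insert, if_neg hun, hd2, cw_get?_erase_of_ne _ _ _ hub,
              hd1, cw_get?_erase_of_ne _ _ _ hua]
            exact hnu
      · -- hload
        intro u r hget
        by_cases hun : u = st.nid
        · subst hun
          rw [PySem.Dict.get?_insert_self] at hget
          rw [PySem.Dict.getD_insert_self, ← Option.some.inj hget, cwDS_append, hla, hlb]
        · rw [PySem.Dict.get?_insert, if_neg hun] at hget
          have hub : u ≠ b := by
            intro h; subst h
            rw [hd2, cw_get?_erase_self] at hget
            cases hget
          have hua : u ≠ a := by
            intro h; subst h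
            rw [hd2, cw_get?_erase_of_ne _ _ _ hub, hd1, cw_get?_erase_self] at hget
            cases hget
          rw [hd2, cw_get?_erase_of_ne _ _ _ hub, hd1, cw_get?_erase_of_ne _ _ _ hua] at hget
          rw [PySem.Dict.getD_insert, if_neg hun]
          exact inv.hload u r hget
    · rw [if_neg (by rintro ⟨-, h2⟩; rw [hsum] at h2; exact hc h2),
        if_neg (by rintro ⟨-, h2⟩; exact hc h2)]
      exact inv

lemma cw_fold_inv (demands : List Int) (n cap : Int) (L : List (Int × Int × Int))
    (hL : ∀ t ∈ L, (1 ≤ t.2.1 ∧ t.2.1 < n) ∧ (1 ≤ t.2.2 ∧ t.2.2 < n))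
    (routes : List (List Int)) (st : CWState) (inv : CWInv demands n routes st) :
    CWInv demands n (L.foldl (cwA_step demands cap) routes) (L.foldl (cwB_step cap) st) := by
  induction L generalizing routes st with
  | nil => exact inv
  | cons t L ih =>
      exact ih (fun s hs => hL s (List.mem_cons_of_mem _ hs)) _ _
        (cw_step_inv demands n cap routes st t (hL t (List.mem_cons_self)).1 (hL t (List.mem_cons_self)).2 inv)

lemma cwB_init_split (demands : List Int) (l : List Int) (st : CWState) :
    l.foldl (cwB_initStep demands) st =
      ⟨l.foldl (fun d i => d.insert i [i]) st.nodes,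
       l.foldl (fun d i => d.insert i (PySem.List.pyGetD demands i 0)) st.load,
       l.foldl (fun d i => d.insert i i) st.owner,
       st.nid⟩ := by
  induction l generalizing st with
  | nil => rfl
  | cons k ks ih => simp [List.foldl_cons, ih, cwB_initStep]

lemma cw_init_inv (demands : List Int) (n : Int) :
    CWInv demands n ((PySem.List.pyRange 1 n 1).map (fun i => [i])) (cwB_init demands n) := by
  have hnd : (PySem.List.pyRange 1 n 1).Nodup := PySem.List.nodup_pyRange_one 1 n
  unfold cwB_init
  rw [cwB_init_split]
  have hN : ((PySem.List.pyRange 1 n 1).foldl (fun d i => d.insert i [i]) (PySem.Dict.empty : PySem.Dict Int (List Int))).items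
      = (PySem.List.pyRange 1 n 1).map (fun i => (i, [i])) := by
    rw [PySem.Dict.items_foldl_insert_fresh _ (fun i => i) (fun i => [i]) _
      (fun a _ => PySem.Dict.contains_empty a) (by simpa using hnd)]
    simp [PySem.Dict.empty]
  have hL : ((PySem.List.pyRange 1 n 1).foldl (fun d i => d.insert i (PySem.List.pyGetD demands i 0)) (PySem.Dict.empty : PySem.Dict Int Int)).items
      = (PySem.List.pyRange 1 n 1).map (fun i => (i, PySem.List.pyGetD demands i 0)) := by
    rw [PySem.Dict.items_foldl_insert_fresh _ (fun i => i) (fun i => PySem.List.pyGetD demands i 0) _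
      (fun a _ => PySem.Dict.contains_empty a) (by simpa using hnd)]
    simp [PySem.Dict.empty]
  have hO : ((PySem.List.pyRange 1 n 1).foldl (fun d i => d.insert i i) (PySem.Dict.empty : PySem.Dict Int Int)).items
      = (PySem.List.pyRange 1 n 1).map (fun i => (i, i)) := by
    rw [PySem.Dict.items_foldl_insert_fresh _ (fun i => i) (fun i => i) _
      (fun a _ => PySem.Dict.contains_empty a) (by simpa using hnd)]
    simp [PySem.Dict.empty]
  have hkeys : ((PySem.List.pyRange 1 n 1).foldl (fun d i => d.insert i [i]) (PySem.Dict.empty : PySem.Dict Int (List Int))).keys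
      = PySem.List.pyRange 1 n 1 := by
    simp [PySem.Dict.keys, hN, Function.comp_def]
  have hOkeys : ((PySem.List.pyRange 1 n 1).foldl (fun d i => d.insert i i) (PySem.Dict.empty : PySem.Dict Int Int)).keys.Nodup := by
    simpa [PySem.Dict.keys, hO, Function.comp_def] using hnd
  have hLkeys : ((PySem.List.pyRange 1 n 1).foldl (fun d i => d.insert i (PySem.List.pyGetD demands i 0)) (PySem.Dict.empty : PySem.Dict Int Int)).keys.Nodup := by
    simpa [PySem.Dict.keys, hL, Function.comp_def] using hnd
  constructor
  · simp [PySem.Dict.values, hN]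
  · simpa [hkeys] using PySem.List.pairwise_lt_pyRange_one 1 n
  · intro k hk
    rw [hkeys] at hk
    exact (PySem.List.mem_pyRange_one.mp hk).2
  · intro p hp
    rw [hN, List.mem_map] at hp
    obtain ⟨i, hi, rfl⟩ := hp
    have := PySem.List.mem_pyRange_one.mp hi
    exact ⟨by simp, by simpa using this⟩
  · intro p hp q hq hne x hx
    rw [hN, List.mem_map] at hp hq
    obtain ⟨i, hi, rfl⟩ := hp
    obtain ⟨j, hj, rfl⟩ := hq
    simp only at hne hx ⊢
    simp only [List.mem_singleton] at hx
    simp [hx, hne]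
  · intro x hx1 hx2
    have hxR : x ∈ PySem.List.pyRange 1 n 1 := PySem.List.mem_pyRange_one.mpr ⟨hx1, hx2⟩
    refine ⟨x, [x], ?_, ?_, by simp⟩
    · exact PySem.Dict.get?_of_mem_items _ (by rw [hO]; exact List.mem_map.mpr ⟨x, hxR, rfl⟩) hOkeys
    · exact PySem.Dict.get?_of_mem_items _ (by rw [hN]; exact List.mem_map.mpr ⟨x, hxR, rfl⟩)
        (by rw [hkeys]; exact hnd)
  · intro t r hget
    have hmem := PySem.Dict.mem_items_of_get?_eq_some _ hget
    rw [hN, List.mem_map] at hmem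
    obtain ⟨i, hi, heq⟩ := hmem
    obtain ⟨rfl, rfl⟩ : i = t ∧ [i] = r := by
      constructor <;> [exact congrArg Prod.fst heq; exact congrArg Prod.snd heq]
    rw [PySem.Dict.getD_of_mem_items _ (by rw [hL]; exact List.mem_map.mpr ⟨i, hi, rfl⟩) hLkeys]
    simp [cwDS]

-- ===== VERDICT (by name: the statement is the Claim_ definition above) =====
theorem clarke_wright_savings_spec : Claim_equal_clarke_wright_savings := by
  intro distances demands cap _ _
  unfold Spec_clarke_wright_savings
  unfold clarke_wright_savings clarke_wright_savings_alt
  rw [← cw_savings_eq]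
  have hmem : ∀ t ∈ PySem.List.sorted (cwA_savings distances) (fun x => x.1) true,
      (1 ≤ t.2.1 ∧ t.2.1 < (distances.length : Int)) ∧ (1 ≤ t.2.2 ∧ t.2.2 < (distances.length : Int)) := by
    intro t ht
    rw [PySem.List.mem_sorted, cw_savings_eq] at ht
    simp only [cwB_savings, List.mem_flatMap, List.mem_map] at ht
    obtain ⟨i, hi, j, hj, rfl⟩ := ht
    rw [PySem.List.mem_pyRange_one] at hi hj
    refine ⟨⟨?_, ?_⟩, ⟨?_, ?_⟩⟩ <;> dsimp only <;> omega
  exact ((cw_fold_inv demands _ cap _ hmem _ _ (cw_init_inv demands _)).hv).symm
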